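-- pv_equiv track=rewrite | github.com/opengit/gitopenlib | gitopenlib/utils/basics.py | list_extremum
-- ===== SOURCE A (Python) =====
-- from typing import Any, Dict, Iterable, List, Union, Tuple
--
-- def list_extremum(data: list, type=0) -> Tuple:
--     """
--     找到list中的极值，并返回索引组成的列表。
--
--     Args:
--         data:
--             list数据。
--         type:
--             1表示执行最大值操作，0表示最小值操作。
--
--     Returns:
--         Union[int, float]:
--             极值。
--         List:
--             极值的索引组成的List。
--     """
--     if type == 1:
--         # 极大值
--         ex = max(data)
--     elif type == 0:
--         # 极小值
--         ex = min(data)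
--     else:
--         raise Exception("The value of 'type' should only be 0 or 1.")
--     # 拿到所有索引
--     idx = [id for id, item in enumerate(data) if item == ex]
--
--     return ex, idx
-- ===== SOURCE B (Python) =====
-- from typing import Tuple
--
--
-- def list_extremum(data: list, type=0) -> Tuple:
--     if type != 1 and type != 0:
--         raise Exception("The value of 'type' should only be 0 or 1.")
--     if not data:
--         raise ValueError("list_extremum() arg is an empty sequence")
--     ex = data[0]
--     idx = [0]
--     for i in range(1, len(data)):
--         item = data[i]
--         if (ex < item) if type == 1 else (item < ex):
--             ex = item
--             idx = [i]
--         elif item == ex: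
--             idx.append(i)
--     return ex, idx
-- ===== Notes on version B (the rewrite author's own statement) =====
-- stated objective: alternative
-- what changed: Replaces A's two passes (max/min over the data, then a full enumerate scan collecting matching indices) by one single pass that maintains the running extremum together with its index list, resetting the list on a strictly better element and appending on a tie.
import Mathlib
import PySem

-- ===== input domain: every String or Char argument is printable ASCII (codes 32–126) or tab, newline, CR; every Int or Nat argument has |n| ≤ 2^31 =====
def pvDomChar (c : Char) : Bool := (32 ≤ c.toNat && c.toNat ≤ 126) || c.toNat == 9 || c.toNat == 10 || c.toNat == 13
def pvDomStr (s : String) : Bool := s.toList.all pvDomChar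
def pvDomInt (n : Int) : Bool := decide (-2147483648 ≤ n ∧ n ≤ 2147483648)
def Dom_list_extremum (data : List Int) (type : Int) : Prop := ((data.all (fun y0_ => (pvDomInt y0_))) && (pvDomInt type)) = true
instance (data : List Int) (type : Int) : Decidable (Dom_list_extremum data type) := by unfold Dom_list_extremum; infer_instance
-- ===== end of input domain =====

-- B replaces A's two passes (min/max, then a full index-collecting scan) by one
-- single pass maintaining the running extremum and its index list together.


-- ===== PORT A =====
-- if type == 1: ex = max(data); elif type == 0: ex = min(data); else raise;
-- idx = [id for id, item in enumerate(data) if item == ex]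
def list_extremum (data : List Int) (type : Int) : Int × List Int :=
  match (if type = 1 then PySem.List.max? data (fun a => a)
         else if type = 0 then PySem.List.min? data (fun a => a)
         else none) with
  | none => (0, [])   -- Python raises here (Exception on bad type, ValueError on empty data); excluded by Pre_
  | some ex =>
      (ex, (PySem.List.enumerate data 0).filterMap
             (fun p => if p.2 = ex then some p.1 else none))

-- ===== PORT B =====
-- the comparison '(ex < item) if type == 1 else (item < ex)'
def pvBet (type item ex : Int) : Bool :=
  if type = 1 then decide (ex < item) else decide (item < ex)

-- the for-loop of Source B: remaining items, current index, current extremum, current index list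
def leGo (type : Int) : List Int → Int → Int → List Int → Int × List Int
  | [], _, ex, idx => (ex, idx)
  | item :: rest, i, ex, idx =>
    if pvBet type item ex then leGo type rest (i + 1) item [i]
    else if item = ex then leGo type rest (i + 1) ex (idx ++ [i])
    else leGo type rest (i + 1) ex idx

def list_extremum_alt (data : List Int) (type : Int) : Int × List Int :=
  if type ≠ 1 ∧ type ≠ 0 then (0, [])   -- Python raises Exception here; excluded by Pre_
  else
    match data with
    | [] => (0, [])                      -- Python raises ValueError here; excluded by Pre_
    | x :: xs => leGo type xs 1 x [0]

-- ===== PRECONDITION & SPEC =====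
-- Pre_ excludes exactly the inputs on which A raises: empty data (ValueError from max/min)
-- and type outside {0, 1} (explicit Exception).
def Pre_list_extremum (data : List Int) (type : Int) : Prop :=
  data ≠ [] ∧ (type = 0 ∨ type = 1)
instance (data : List Int) (type : Int) : Decidable (Pre_list_extremum data type) := by
  unfold Pre_list_extremum; infer_instance

def pvWitness_list_extremum : List Int × Int := ([3, 1, 2, 1], 0)

def Spec_list_extremum (data : List Int) (type : Int) (out : Int × List Int) : Prop := out = list_extremum_alt data type
instance (data : List Int) (type : Int) (out : Int × List Int) : Decidable (Spec_list_extremum data type out) := by unfold Spec_list_extremum; infer_instance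

-- ===== CLAIM (what is proved, stated in full; the proofs are below) =====
def Claim_equal_list_extremum : Prop := ∀ (data : List Int) (type : Int), Dom_list_extremum data type → Pre_list_extremum data type → Spec_list_extremum data type (list_extremum data type)

-- ===== LEMMAS AND PROOFS =====

-- the fold computing the extremum of ex :: rest with B's comparison
def pvFold (type ex : Int) (rest : List Int) : Int :=
  rest.foldl (fun m x => if pvBet type x m then x else m) ex

theorem pvBet_asymm (type a b : Int) (h : pvBet type a b = true) : pvBet type b a = false := by
  unfold pvBet at *; split_ifs at * <;> simp_all <;> omega

theorem pvBet_connex (type a b : Int) (h : pvBet type a b ≠ true) (hne : a ≠ b) :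
    pvBet type b a = true := by
  unfold pvBet at *; split_ifs at * <;> simp_all <;> omega

theorem pvBet_trans (type a b c : Int) (h1 : pvBet type a b = true) (h2 : pvBet type b c = true) :
    pvBet type a c = true := by
  unfold pvBet at *; split_ifs at * <;> simp_all <;> omega

-- the fold result is the start value or strictly better than it
theorem pvFold_better (type : Int) (rest : List Int) (ex : Int) :
    pvFold type ex rest = ex ∨ pvBet type (pvFold type ex rest) ex = true := by
  induction rest generalizing ex with
  | nil => left; rfl
  | cons x rest ih =>
    unfold pvFold at *
    simp only [List.foldl_cons]
    by_cases hb : pvBet type x ex = true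
    · simp only [hb, if_true]
      rcases ih x with h | h
      · right; rw [h]; exact hb
      · right; exact pvBet_trans type _ x ex h hb
    · simp only [hb]
      exact ih ex

-- invariant of Source B's loop: the result is the fold extremum, with the index list rebuilt
-- from idx (kept iff the extremum never improves) plus all later positions matching it
theorem leGo_spec (type : Int) (rest : List Int) (i ex : Int) (idx : List Int) :
    leGo type rest i ex idx =
      (pvFold type ex rest,
       (if pvFold type ex rest = ex then idx else [])
         ++ (PySem.List.enumerate rest i).filterMap
              (fun p => if p.2 = pvFold type ex rest then some p.1 else none)) := by
  induction rest generalizing i ex idx with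
  | nil => simp [leGo, pvFold]
  | cons x rest ih =>
    have hfold : pvFold type ex (x :: rest) = pvFold type (if pvBet type x ex then x else ex) rest := by
      unfold pvFold; simp
    rw [PySem.List.enumerate_cons]
    by_cases hb : pvBet type x ex = true
    · -- strictly better: reset the index list
      rw [hfold]; simp only [hb, if_true]
      have hne : pvFold type x rest ≠ ex := by
        intro he
        rcases pvFold_better type rest x with h | h
        · rw [h] at he; subst he; simp [pvBet_asymm type _ _ hb] at hb
        · rw [he] at h
          have := pvBet_asymm type _ _ hb; rw [this] at h; exact Bool.false_ne_true h
      have hxm : (x = pvFold type x rest) ↔ (pvFold type x rest = x) := eq_comm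
      rw [show leGo type (x :: rest) i ex idx = leGo type rest (i + 1) x [i] by
            simp [leGo, hb], ih]
      simp only [List.filterMap_cons, hne]
      by_cases hxM : pvFold type x rest = x
      · simp [hxM]
      · have : ¬ ((x : Int) = pvFold type x rest) := fun h => hxM h.symm
        simp [hxM, this]
    · by_cases he : x = ex
      · -- tie: append the index
        subst he
        rw [hfold]; simp only [hb]
        rw [show leGo type (x :: rest) i x idx = leGo type rest (i + 1) x (idx ++ [i]) by
              simp [leGo, hb], ih]
        simp only [List.filterMap_cons]
        by_cases hM : pvFold type x rest = x
        · simp [hM]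
        · have : ¬ ((x : Int) = pvFold type x rest) := fun h => hM h.symm
          simp [hM, this]
      · -- strictly worse: skip
        rw [hfold]; simp only [hb]
        rw [show leGo type (x :: rest) i ex idx = leGo type rest (i + 1) ex idx by
              simp [leGo, hb, he], ih]
        have hxne : ¬ ((x : Int) = pvFold type ex rest) := by
          intro hxM
          have hbex : pvBet type ex x = true := pvBet_connex type x ex hb he
          rcases pvFold_better type rest ex with h | h
          · rw [h] at hxM; exact he hxM
          · rw [← hxM] at h
            have := pvBet_trans type ex x ex hbex h
            have hirr : pvBet type ex ex = false := by
              unfold pvBet; split_ifs <;> simp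
            rw [hirr] at this; exact Bool.false_ne_true this
        simp [hxne]

-- A's min/max fold equals B's fold
theorem min?_eq_pvFold (x : Int) (xs : List Int) :
    PySem.List.min? (x :: xs) (fun a => a) = some (pvFold 0 x xs) := by
  induction xs generalizing x with
  | nil => rfl
  | cons y ys ih =>
    have hstep : PySem.List.min? (x :: y :: ys) (fun a => a)
        = PySem.List.min? ((if y < x then y else x) :: ys) (fun a => a) := by
      simp only [PySem.List.min?, List.foldl_cons]
      split_ifs <;> rfl
    rw [hstep, ih]
    unfold pvFold pvBet
    simp

theorem max?_eq_pvFold (x : Int) (xs : List Int) :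
    PySem.List.max? (x :: xs) (fun a => a) = some (pvFold 1 x xs) := by
  induction xs generalizing x with
  | nil => rfl
  | cons y ys ih =>
    have hstep : PySem.List.max? (x :: y :: ys) (fun a => a)
        = PySem.List.max? ((if x < y then y else x) :: ys) (fun a => a) := by
      simp only [PySem.List.max?, List.foldl_cons]
      split_ifs <;> rfl
    rw [hstep, ih]
    unfold pvFold pvBet
    simp

-- ===== VERDICT (by name: the statement is the Claim_ definition above) =====
theorem list_extremum_spec : Claim_equal_list_extremum := by
  intro data type _ hpre
  obtain ⟨hne, hty⟩ := hpre
  obtain ⟨x, xs, rfl⟩ : ∃ y ys, data = y :: ys := by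
    cases data with
    | nil => exact absurd rfl hne
    | cons y ys => exact ⟨y, ys, rfl⟩
  unfold Spec_list_extremum list_extremum list_extremum_alt
  rcases hty with rfl | rfl
  · norm_num [min?_eq_pvFold, leGo_spec, PySem.List.enumerate_cons, List.filterMap_cons]
    by_cases hM : pvFold 0 x xs = x
    · simp [hM]
    · have hx : ¬ ((x : Int) = pvFold 0 x xs) := fun h => hM h.symm
      simp [hM, hx]
  · norm_num [max?_eq_pvFold, leGo_spec, PySem.List.enumerate_cons, List.filterMap_cons]
    by_cases hM : pvFold 1 x xs = x
    · simp [hM]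
    · have hx : ¬ ((x : Int) = pvFold 1 x xs) := fun h => hM h.symm
      simp [hM, hx]
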